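-- pv_equiv track=rewrite | github.com/arach/ai | training/finetune/eval_bash.py | fix_repetition
-- ===== SOURCE A (Python) =====
-- def fix_repetition(text: str) -> str:
--     """Detect and truncate degenerate repetition loops.
--
--     Strategy: find the shortest repeating unit (2-20 chars) that occurs 3+
--     times consecutively, then keep just the first occurrence in context.
--
--     Examples:
--         "echo {} {}. {}. {}. {}. ..." → "echo {} {}"
--         "ls -la -la -la"              → "ls -la"
--     """
--     # Look for a repeated pattern: (unit)(separator + unit){2,}
--     # The separator is typically ". " or " " or nothing
--     for unit_len in range(2, min(25, len(text) // 3 + 1)):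
--         for start in range(len(text) - unit_len * 3):
--             unit = text[start:start + unit_len]
--             if not unit.strip():
--                 continue
--             # Count consecutive repeats of this unit starting at `start`
--             count = 1
--             pos = start + unit_len
--             while pos + unit_len <= len(text) and text[pos:pos + unit_len] == unit:
--                 count += 1
--                 pos += unit_len
--             # Also try with ". " separator (common in repetition bugs)
--             if count < 3:
--                 count = 1
--                 pos = start + unit_len
--                 for sep in [". ", " ", ", "]:
--                     count_sep = 1
--                     pos_sep = start + unit_len
--                     while (pos_sep + len(sep) + unit_len <= len(text)
--                            and text[pos_sep:pos_sep + len(sep)] == sep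
--                            and text[pos_sep + len(sep):pos_sep + len(sep) + unit_len] == unit):
--                         count_sep += 1
--                         pos_sep += len(sep) + unit_len
--                     if count_sep > count:
--                         count = count_sep
--                         pos = pos_sep
--
--             if count >= 3:
--                 # Truncate: keep everything before the repetition + one instance
--                 return text[:start + unit_len].rstrip(". ,")
--
--     return text
-- ===== SOURCE B (Python) =====
-- def fix_repetition(text: str) -> str:
--     """Same result as A, but per candidate (unit_len, start) it checks the two
--     following blocks directly instead of running counting while-loops:
--     'count >= 3' holds iff the first two repetitions (for some separator) match."""
--     L = len(text)
--     for u in range(2, min(25, L // 3 + 1)):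
--         for start in range(L - u * 3):
--             unit = text[start:start + u]
--             if not unit.strip():
--                 continue
--             end = start + u
--             for sep in ("", ". ", " ", ", "):
--                 s = len(sep)
--                 a2 = end + s + u
--                 if (a2 + s + u <= L
--                         and text[end:end + s] == sep
--                         and text[end + s:end + s + u] == unit
--                         and text[a2:a2 + s] == sep
--                         and text[a2 + s:a2 + s + u] == unit):
--                     return text[:end].rstrip(". ,")
--     return text
-- ===== Notes on version B (the rewrite author's own statement) =====
-- stated objective: simpler
-- what changed: B replaces A's three counting while-loops and max/count bookkeeping per candidate by a direct constant-size check of the next two blocks (count>=3 holds iff the first two repetitions match for some separator, the empty separator subsuming A's separate no-separator loop), returning the same truncation at the same first (unit_len, start).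
import Mathlib
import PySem

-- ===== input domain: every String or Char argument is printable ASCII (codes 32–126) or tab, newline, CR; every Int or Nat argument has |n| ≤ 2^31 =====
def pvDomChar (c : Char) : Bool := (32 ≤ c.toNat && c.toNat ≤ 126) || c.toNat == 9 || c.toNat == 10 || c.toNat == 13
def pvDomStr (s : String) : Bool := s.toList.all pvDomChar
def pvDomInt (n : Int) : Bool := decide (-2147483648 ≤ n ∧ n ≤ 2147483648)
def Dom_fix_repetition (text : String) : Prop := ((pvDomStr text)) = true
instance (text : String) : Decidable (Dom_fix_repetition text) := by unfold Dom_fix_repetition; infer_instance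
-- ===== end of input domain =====

-- B replaces A's counting while-loops by a direct check of the next two blocks (simpler; same value everywhere).

-- shared Python-primitive helpers: text[i:j], text[:j], and str.rstrip(". ") with an explicit
-- char set (hand port of s.rstrip(". ,"): drop trailing '.', ' ', ',' — exact for these chars)
def pySliceN (cs : List Char) (a b : Nat) : List Char :=
  PySem.List.slice cs (some (a : Int)) (some (b : Int))
def pySliceTo (cs : List Char) (b : Nat) : List Char :=
  PySem.List.slice cs none (some (b : Int))
def pvRstripPy (cs : List Char) : List Char :=
  (cs.reverse.dropWhile (fun c => c == '.' || c == ' ' || c == ',')).reverse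

-- ===== PORT A =====
-- the no-separator counting while-loop ('while pos + unit_len <= len(text) and text[pos:pos+unit_len] == unit')
def aLoop1 (cs unit : List Char) (u : Nat) : Nat → Nat → Nat → Nat
  | 0, _, count => count
  | fuel+1, pos, count =>
    if pos + u ≤ cs.length ∧ pySliceN cs pos (pos + u) = unit then
      aLoop1 cs unit u fuel (pos + u) (count + 1)
    else count

-- the separator counting while-loop (fuel = len(text) suffices: each iteration moves pos forward)
def aLoop2 (cs unit sep : List Char) (u : Nat) : Nat → Nat → Nat → Nat
  | 0, _, count => count
  | fuel+1, pos, count =>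
    if pos + sep.length + u ≤ cs.length ∧ pySliceN cs pos (pos + sep.length) = sep ∧
        pySliceN cs (pos + sep.length) (pos + sep.length + u) = unit then
      aLoop2 cs unit sep u fuel (pos + sep.length + u) (count + 1)
    else count

-- 'for start in range(...)' with early return; pos is never read after the loops, so only count is kept
def aStartLoop (cs : List Char) (u : Nat) : List Nat → Option String
  | [] => none
  | start :: rest =>
    let unit := pySliceN cs start (start + u)
    if PySem.Chars.strip unit = [] then aStartLoop cs u rest
    else
      let count := aLoop1 cs unit u cs.length (start + u) 1
      let count2 := if count < 3 then
          [['.', ' '], [' '], [',', ' ']].foldl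
            (fun c sep =>
              let cSep := aLoop2 cs unit sep u cs.length (start + u) 1
              if c < cSep then cSep else c) 1
        else count
      if 3 ≤ count2 then some (String.ofList (pvRstripPy (pySliceTo cs (start + u))))
      else aStartLoop cs u rest

def aULoop (cs : List Char) : List Nat → Option String
  | [] => none
  | u :: rest =>
    match aStartLoop cs u (List.range (cs.length - u * 3)) with
    | some r => some r
    | none => aULoop cs rest

def fix_repetition (text : String) : String :=
  let cs := text.toList
  (aULoop cs (List.range' 2 (min 25 (cs.length / 3 + 1) - 2))).getD text

-- ===== PORT B =====
-- B's per-candidate test: the two blocks (with separator sep) following text[start:start+u] both repeat it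
def bCheck (cs unit : List Char) (u e : Nat) (sep : List Char) : Bool :=
  let s := sep.length
  let a2 := e + s + u
  decide (a2 + s + u ≤ cs.length) && (pySliceN cs e (e + s) == sep) &&
    (pySliceN cs (e + s) (e + s + u) == unit) && (pySliceN cs a2 (a2 + s) == sep) &&
    (pySliceN cs (a2 + s) (a2 + s + u) == unit)

def bStartLoop (cs : List Char) (u : Nat) : List Nat → Option String
  | [] => none
  | start :: rest =>
    let unit := pySliceN cs start (start + u)
    if PySem.Chars.strip unit = [] then bStartLoop cs u rest
    else
      if ([([] : List Char), ['.', ' '], [' '], [',', ' ']].any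
            (fun sep => bCheck cs unit u (start + u) sep)) = true then
        some (String.ofList (pvRstripPy (pySliceTo cs (start + u))))
      else bStartLoop cs u rest

def bULoop (cs : List Char) : List Nat → Option String
  | [] => none
  | u :: rest =>
    match bStartLoop cs u (List.range (cs.length - u * 3)) with
    | some r => some r
    | none => bULoop cs rest

def fix_repetition_alt (text : String) : String :=
  let cs := text.toList
  (bULoop cs (List.range' 2 (min 25 (cs.length / 3 + 1) - 2))).getD text

-- ===== PRECONDITION & SPEC =====
def Spec_fix_repetition (text : String) (out : String) : Prop := out = fix_repetition_alt text
instance (text : String) (out : String) : Decidable (Spec_fix_repetition text out) := by unfold Spec_fix_repetition; infer_instance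

-- ===== CLAIM (what is proved, stated in full; the proofs are below) =====
def Claim_equal_fix_repetition : Prop := ∀ (text : String), Dom_fix_repetition text → Spec_fix_repetition text (fix_repetition text)

-- ===== LEMMAS AND PROOFS =====

theorem pySliceN_eq (cs : List Char) (a b : Nat) : pySliceN cs a b = (cs.drop a).take (b - a) := by
  simp [pySliceN, PySem.List.slice_natCast]

-- the pattern holding at position p: separator sep then a copy of unit
def Crep (cs unit sep : List Char) (u p : Nat) : Prop :=
  p + sep.length + u ≤ cs.length ∧ pySliceN cs p (p + sep.length) = sep ∧
    pySliceN cs (p + sep.length) (p + sep.length + u) = unit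

theorem aLoop1_eq_nil (cs unit : List Char) (u : Nat) :
    ∀ fuel pos count, aLoop1 cs unit u fuel pos count = aLoop2 cs unit [] u fuel pos count := by
  intro fuel
  induction fuel with
  | zero => intro pos count; rfl
  | succ f ih =>
    intro pos count
    simp only [aLoop1, aLoop2, List.length_nil, Nat.add_zero, pySliceN_eq, Nat.sub_self,
      List.take_zero, true_and, ih]

theorem le_aLoop2 (cs unit sep : List Char) (u : Nat) :
    ∀ fuel pos count, count ≤ aLoop2 cs unit sep u fuel pos count := by
  intro fuel
  induction fuel with
  | zero => intro pos count; exact le_refl _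
  | succ f ih =>
    intro pos count
    simp only [aLoop2]
    split
    · exact le_trans (by omega) (ih _ _)
    · exact le_refl _

theorem aLoop2_ge3_iff (cs unit sep : List Char) (u : Nat) (fuel pos : Nat) (hf : 2 ≤ fuel) :
    3 ≤ aLoop2 cs unit sep u fuel pos 1 ↔
      Crep cs unit sep u pos ∧ Crep cs unit sep u (pos + sep.length + u) := by
  obtain ⟨f, rfl⟩ : ∃ f, fuel = f + 2 := ⟨fuel - 2, by omega⟩
  show 3 ≤ aLoop2 cs unit sep u (f + 1 + 1) pos 1 ↔ _
  simp only [aLoop2, Crep]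
  split
  · rename_i h1
    split
    · rename_i h2
      simp only [iff_true_intro h1, iff_true_intro h2]
      constructor
      · intro _; exact ⟨trivial, trivial⟩
      · intro _; exact le_trans (by omega) (le_aLoop2 cs unit sep u f _ 3)
    · rename_i h2
      constructor
      · omega
      · intro ⟨_, hc2⟩; exact absurd hc2 h2
  · rename_i h1
    constructor
    · omega
    · intro ⟨hc1, _⟩; exact absurd hc1 h1

theorem bCheck_iff (cs unit : List Char) (u e : Nat) (sep : List Char) :
    bCheck cs unit u e sep = true ↔
      Crep cs unit sep u e ∧ Crep cs unit sep u (e + sep.length + u) := by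
  simp only [bCheck, Crep, Bool.and_eq_true, decide_eq_true_eq, beq_iff_eq]
  constructor
  · rintro ⟨⟨⟨⟨h1, h2⟩, h3⟩, h4⟩, h5⟩
    exact ⟨⟨by omega, h2, h3⟩, h1, h4, h5⟩
  · rintro ⟨⟨_, h2, h3⟩, h1, h4, h5⟩
    exact ⟨⟨⟨⟨h1, h2⟩, h3⟩, h4⟩, h5⟩

theorem decision_iff (cs unit : List Char) (u e : Nat) (hL : 2 ≤ cs.length) :
    (3 ≤ (if aLoop1 cs unit u cs.length e 1 < 3 then
            [['.', ' '], [' '], [',', ' ']].foldl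
              (fun c sep =>
                let cSep := aLoop2 cs unit sep u cs.length e 1
                if c < cSep then cSep else c) 1
          else aLoop1 cs unit u cs.length e 1)) ↔
      ([([] : List Char), ['.', ' '], [' '], [',', ' ']].any
        (fun sep => bCheck cs unit u e sep)) = true := by
  rw [aLoop1_eq_nil]
  have h0 := aLoop2_ge3_iff cs unit [] u cs.length e hL
  have h1 := aLoop2_ge3_iff cs unit ['.', ' '] u cs.length e hL
  have h2 := aLoop2_ge3_iff cs unit [' '] u cs.length e hL
  have h3 := aLoop2_ge3_iff cs unit [',', ' '] u cs.length e hL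
  simp only [List.any_cons, List.any_nil, Bool.or_eq_true, Bool.or_false,
    bCheck_iff, ← h0, ← h1, ← h2, ← h3, List.foldl]
  split_ifs <;> omega

theorem startLoop_eq (cs : List Char) (u : Nat) (hu : 1 ≤ u) :
    ∀ starts, (∀ s ∈ starts, s + u * 3 < cs.length) →
      aStartLoop cs u starts = bStartLoop cs u starts := by
  intro starts
  induction starts with
  | nil => intro _; rfl
  | cons start rest ih =>
    intro hmem
    have hL : 2 ≤ cs.length := by
      have := hmem start (List.mem_cons_self ..)
      omega
    have hrest : ∀ s ∈ rest, s + u * 3 < cs.length := fun s hs => hmem s (List.mem_cons_of_mem _ hs)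
    simp only [aStartLoop, bStartLoop]
    by_cases hs : PySem.Chars.strip (pySliceN cs start (start + u)) = []
    · rw [if_pos hs, if_pos hs, ih hrest]
    · rw [if_neg hs, if_neg hs,
        if_congr (decision_iff cs (pySliceN cs start (start + u)) u (start + u) hL) rfl (ih hrest)]

theorem uLoop_eq (cs : List Char) :
    ∀ us, (∀ u ∈ us, 1 ≤ u) → aULoop cs us = bULoop cs us := by
  intro us
  induction us with
  | nil => intro _; rfl
  | cons u rest ih =>
    intro hmem
    simp only [aULoop, bULoop]
    rw [startLoop_eq cs u (hmem u (List.mem_cons_self ..)) (List.range (cs.length - u * 3))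
        (fun s hs => by have := List.mem_range.mp hs; omega),
      ih (fun v hv => hmem v (List.mem_cons_of_mem _ hv))]

-- ===== VERDICT (by name: the statement is the Claim_ definition above) =====
theorem fix_repetition_spec : Claim_equal_fix_repetition := by
  intro text _
  unfold Spec_fix_repetition fix_repetition fix_repetition_alt
  show (aULoop text.toList (List.range' 2 (min 25 (text.toList.length / 3 + 1) - 2))).getD text = _
  rw [uLoop_eq text.toList _ (fun v hv => by
    have := List.mem_range'.mp hv
    omega)]
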